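-- pv_equiv track=rewrite | github.com/GrigoryM1A1/ASD-AGH-2022 | dp_greedy/black_forrest.py | cut_forrest
-- ===== SOURCE A (Python) =====
-- def cut_forrest(A):
--     n = len(A)
--     F = [0] * n  # F[i] - max zysk ze sciecia drzew 0, ..., i
--     P = [None] * n
--     F[0] = A[0]
--     P[0] = (None, True)
--     if A[1] >= A[0]:
--         F[1] = A[1]
--         P[1] = (None, True)
--     else:
--         F[1] = A[0]
--         P[1] = (0, False)
--     for i in range(2, n):
--         if F[i - 1] >= F[i - 2] + A[i]:
--             F[i] = F[i - 1]
--             P[i] = (i - 1, False)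
--         else:
--             F[i] = F[i - 2] + A[i]
--             P[i] = (i - 2, True)
--
--     res = []
--     curr = n - 1
--     while P[curr][0] is not None:
--         if P[curr][1]: res.append(curr)
--         curr = P[curr][0]
--     if P[curr][1]: res.append(curr)
--
--     return res[::-1]
-- ===== SOURCE B (Python) =====
-- def cut_forrest(A):
--     # Single forward pass that carries the actual solution lists (and their values)
--     # for the two most recent prefixes; no parent table, no backtracking, no reversal.
--     v0, s0 = A[0], [0]
--     if A[1] >= A[0]:
--         v1, s1 = A[1], [1]
--     else:
--         v1, s1 = A[0], [0]
--     for i in range(2, len(A)):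
--         if v1 >= v0 + A[i]:
--             v0, s0 = v1, s1
--         else:
--             v0, s0, v1, s1 = v1, s1, v0 + A[i], s0 + [i]
--     return s1
-- ===== Notes on version B (the rewrite author's own statement) =====
-- stated objective: alternative
-- what changed: B replaces A's parent-pointer table plus backward reconstruction walk with a single forward pass that carries the two most recent optimal index lists themselves (value, list) as accumulators, returning the last list directly with no backtracking and no reversal.
import Mathlib
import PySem

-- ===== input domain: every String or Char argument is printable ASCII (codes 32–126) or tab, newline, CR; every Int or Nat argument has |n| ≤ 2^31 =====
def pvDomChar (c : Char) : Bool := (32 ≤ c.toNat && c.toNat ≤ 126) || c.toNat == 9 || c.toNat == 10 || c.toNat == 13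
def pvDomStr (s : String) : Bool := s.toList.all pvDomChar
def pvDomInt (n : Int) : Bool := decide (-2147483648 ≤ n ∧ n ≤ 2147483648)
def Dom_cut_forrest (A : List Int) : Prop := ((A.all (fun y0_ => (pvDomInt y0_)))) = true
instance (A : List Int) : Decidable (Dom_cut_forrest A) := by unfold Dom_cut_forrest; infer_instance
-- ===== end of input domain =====

-- B replaces A's parent table + backward pointer walk by ONE forward pass that carries the two most
-- recent optimal index LISTS themselves as accumulators (objective: alternative — no backtracking,
-- no reversal; trades A's tables for list copying, so B can be slower on large inputs).

-- ===== PORT A =====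
-- body of A's `for i in range(2, n)` loop: updates F[i] and P[i] with A's two branches
def cutStepA (A : List Int) (FP : List Int × List (Option Int × Bool)) (i : Int) :
    List Int × List (Option Int × Bool) :=
  if PySem.List.pyGetD FP.1 (i - 1) 0 ≥ PySem.List.pyGetD FP.1 (i - 2) 0 + PySem.List.pyGetD A i 0 then
    (PySem.List.pySetD FP.1 i (PySem.List.pyGetD FP.1 (i - 1) 0),
     PySem.List.pySetD FP.2 i (some (i - 1), false))
  else
    (PySem.List.pySetD FP.1 i (PySem.List.pyGetD FP.1 (i - 2) 0 + PySem.List.pyGetD A i 0),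
     PySem.List.pySetD FP.2 i (some (i - 2), true))

-- A's `while P[curr][0] is not None` pointer walk (plus the trailing `if P[curr][1]` append);
-- fuel is only a totality guard: under Pre_ the parent pointers strictly decrease, fuel = n suffices
def cutWalkA (P : List (Option Int × Bool)) : Nat → Int → List Int → List Int
  | 0, _, acc => acc
  | fuel + 1, curr, acc =>
    let e := PySem.List.pyGetD P curr (none, true)
    let acc' := if e.2 then acc ++ [curr] else acc
    match e.1 with
    | none => acc'
    | some p => cutWalkA P fuel p acc'

-- `P = [None]*n` is modelled with placeholder (none, true): under Pre_ every entry read by the walk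
-- was overwritten first; A[0], A[1], F[...], P[...] reads are in range under Pre_, hence pyGetD
def cut_forrest (A : List Int) : List Int :=
  let n : Int := A.length
  let F : List Int := List.replicate A.length 0
  let P : List (Option Int × Bool) := List.replicate A.length ((none : Option Int), true)
  let F := PySem.List.pySetD F 0 (PySem.List.pyGetD A 0 0)
  let P := PySem.List.pySetD P 0 ((none : Option Int), true)
  let FP :=
    if PySem.List.pyGetD A 1 0 ≥ PySem.List.pyGetD A 0 0 then
      (PySem.List.pySetD F 1 (PySem.List.pyGetD A 1 0),
       PySem.List.pySetD P 1 ((none : Option Int), true))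
    else
      (PySem.List.pySetD F 1 (PySem.List.pyGetD A 0 0),
       PySem.List.pySetD P 1 (some 0, false))
  let FP := (PySem.List.pyRange 2 n 1).foldl (cutStepA A) FP
  (cutWalkA FP.2 A.length (n - 1) []).reverse  -- res[::-1]

-- ===== PORT B =====
-- body of B's `for i in range(2, len(A))` loop over the state (v0, s0, v1, s1)
def cutStepB (A : List Int) (st : Int × List Int × Int × List Int) (i : Int) :
    Int × List Int × Int × List Int :=
  if st.2.2.1 ≥ st.1 + PySem.List.pyGetD A i 0 then
    (st.2.2.1, st.2.2.2, st.2.2.1, st.2.2.2)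
  else
    (st.2.2.1, st.2.2.2, st.1 + PySem.List.pyGetD A i 0, st.2.1 ++ [i])

def cut_forrest_alt (A : List Int) : List Int :=
  let st0 : Int × List Int × Int × List Int :=
    if PySem.List.pyGetD A 1 0 ≥ PySem.List.pyGetD A 0 0 then
      (PySem.List.pyGetD A 0 0, [0], PySem.List.pyGetD A 1 0, [1])
    else
      (PySem.List.pyGetD A 0 0, [0], PySem.List.pyGetD A 0 0, [0])
  let st := (PySem.List.pyRange 2 (A.length : Int) 1).foldl (cutStepB A) st0
  st.2.2.2

-- ===== PRECONDITION & SPEC =====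
-- Pre_ excludes exactly the inputs with fewer than 2 elements, on which Python A raises IndexError
-- (A[1], resp. A[0], out of range)
def Pre_cut_forrest (A : List Int) : Prop := 2 ≤ A.length
instance (A : List Int) : Decidable (Pre_cut_forrest A) := by unfold Pre_cut_forrest; infer_instance
def pvWitness_cut_forrest : List Int := [3, 1, 4, 1, 5]

def Spec_cut_forrest (A : List Int) (out : List Int) : Prop := out = cut_forrest_alt A
instance (A : List Int) (out : List Int) : Decidable (Spec_cut_forrest A out) := by unfold Spec_cut_forrest; infer_instance

-- ===== CLAIM (what is proved, stated in full; the proofs are below) =====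
def Claim_equal_cut_forrest : Prop := ∀ (A : List Int), Dom_cut_forrest A → Pre_cut_forrest A → Spec_cut_forrest A (cut_forrest A)

-- ===== LEMMAS AND PROOFS =====

-- the DP value F[j] and the optimal index list for prefix 0..j, as pure recursions (proof helpers)
def Fv (A : List Int) : Nat → Int
  | 0 => A.getD 0 0
  | 1 => if A.getD 1 0 ≥ A.getD 0 0 then A.getD 1 0 else A.getD 0 0
  | (k + 2) =>
    if Fv A (k + 1) ≥ Fv A k + A.getD (k + 2) 0 then Fv A (k + 1)
    else Fv A k + A.getD (k + 2) 0

def Sol (A : List Int) : Nat → List Int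
  | 0 => [0]
  | 1 => if A.getD 1 0 ≥ A.getD 0 0 then [1] else [0]
  | (k + 2) =>
    if Fv A (k + 1) ≥ Fv A k + A.getD (k + 2) 0 then Sol A (k + 1)
    else Sol A k ++ [((k : Int) + 2)]

-- initial F (after the two base-case assignments) of port A
def cutF0 (A : List Int) : List Int :=
  PySem.List.pySetD (PySem.List.pySetD (List.replicate A.length 0) 0 (PySem.List.pyGetD A 0 0)) 1
    (if PySem.List.pyGetD A 1 0 ≥ PySem.List.pyGetD A 0 0 then PySem.List.pyGetD A 1 0
     else PySem.List.pyGetD A 0 0)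

-- initial P of port A
def cutP0 (A : List Int) : List (Option Int × Bool) :=
  PySem.List.pySetD
    (PySem.List.pySetD (List.replicate A.length ((none : Option Int), true)) 0 ((none : Option Int), true)) 1
    (if PySem.List.pyGetD A 1 0 ≥ PySem.List.pyGetD A 0 0 then ((none : Option Int), true)
     else (some 0, false))

def cutDflt : Option Int × Bool := ((none : Option Int), true)

-- the fold state of port A after processing range(2, k)
def cutFold (A : List Int) (k : Nat) : List Int × List (Option Int × Bool) :=
  (PySem.List.pyRange 2 (k : Int) 1).foldl (cutStepA A) (cutF0 A, cutP0 A)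

theorem Fv_eq (A : List Int) (k : Nat) (h : 2 ≤ k) :
    Fv A k = if Fv A (k - 1) ≥ Fv A (k - 2) + A.getD k 0 then Fv A (k - 1)
             else Fv A (k - 2) + A.getD k 0 := by
  obtain ⟨m, rfl⟩ : ∃ m, k = m + 2 := ⟨k - 2, by omega⟩
  simp [Fv, show m + 2 - 1 = m + 1 from rfl, show m + 2 - 2 = m from rfl]

theorem Sol_eq (A : List Int) (k : Nat) (h : 2 ≤ k) :
    Sol A k = if Fv A (k - 1) ≥ Fv A (k - 2) + A.getD k 0 then Sol A (k - 1)
              else Sol A (k - 2) ++ [(k : Int)] := by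
  obtain ⟨m, rfl⟩ : ∃ m, k = m + 2 := ⟨k - 2, by omega⟩
  simp only [Sol, show m + 2 - 1 = m + 1 from rfl, show m + 2 - 2 = m from rfl]
  norm_num

theorem getD_set_ne {α : Type} (xs : List α) (i j : Nat) (v d : α) (h : i ≠ j) :
    (xs.set i v).getD j d = xs.getD j d := by
  simp [List.getD_eq_getElem?_getD, List.getElem?_set_ne h]

theorem getD_set_self {α : Type} (xs : List α) (j : Nat) (v d : α) (h : j < xs.length) :
    (xs.set j v).getD j d = v := by
  simp [List.getD_eq_getElem?_getD, h]

theorem cutInv (A : List Int) (hn : 2 ≤ A.length) (k : Nat) (hk2 : 2 ≤ k) (hkn : k ≤ A.length) :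
    (cutFold A k).1.length = A.length ∧ (cutFold A k).2.length = A.length ∧
    (∀ j : Nat, j < k → (cutFold A k).1.getD j 0 = Fv A j) ∧
    (cutFold A k).2.getD 0 cutDflt = ((none : Option Int), true) ∧
    (cutFold A k).2.getD 1 cutDflt =
      (if PySem.List.pyGetD A 1 0 ≥ PySem.List.pyGetD A 0 0 then ((none : Option Int), true)
       else (some 0, false)) ∧
    ∀ j : Nat, 2 ≤ j → j < k →
      (cutFold A k).2.getD j cutDflt =
        (if Fv A (j - 1) ≥ Fv A (j - 2) + A.getD j 0
         then (some ((j : Int) - 1), false) else (some ((j : Int) - 2), true)) := by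
  induction k, hk2 using Nat.le_induction with
  | base =>
      have hrange : PySem.List.pyRange 2 ((2 : Nat) : Int) 1 = [] := by
        rw [show ((2 : Nat) : Int) = 2 by norm_num]
        exact PySem.List.pyRange_one_eq_nil (le_refl 2)
      have hfold : cutFold A 2 = (cutF0 A, cutP0 A) := by
        unfold cutFold; rw [hrange]; rfl
      rw [hfold]
      have hF0 : cutF0 A =
          ((List.replicate A.length (0 : Int)).set 0 (PySem.List.pyGetD A 0 0)).set 1
            (if PySem.List.pyGetD A 1 0 ≥ PySem.List.pyGetD A 0 0 then PySem.List.pyGetD A 1 0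
             else PySem.List.pyGetD A 0 0) := by
        unfold cutF0
        rw [PySem.List.pySetD_of_nonneg _ _ (by norm_num),
            PySem.List.pySetD_of_nonneg _ _ (by norm_num)]
        rfl
      have hP0 : cutP0 A =
          ((List.replicate A.length cutDflt).set 0 ((none : Option Int), true)).set 1
            (if PySem.List.pyGetD A 1 0 ≥ PySem.List.pyGetD A 0 0 then ((none : Option Int), true)
             else (some 0, false)) := by
        unfold cutP0 cutDflt
        rw [PySem.List.pySetD_of_nonneg _ _ (by norm_num),
            PySem.List.pySetD_of_nonneg _ _ (by norm_num)]
        rfl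
      have e0 : PySem.List.pyGetD A 0 0 = A.getD 0 0 := PySem.List.pyGetD_zero A _
      have e1 : PySem.List.pyGetD A 1 0 = A.getD 1 0 := PySem.List.pyGetD_ofNat' A 1 _
      refine ⟨by simp [hF0], by simp [hP0], ?_, ?_, ?_, by omega⟩
      · intro j hj
        interval_cases j
        · rw [hF0, getD_set_ne _ _ _ _ _ (by omega), getD_set_self _ _ _ _ (by simp; omega)]
          rw [e0]; rfl
        · rw [hF0, getD_set_self _ _ _ _ (by simp; omega)]
          simp only [e0, e1]; rfl
      · rw [hP0, getD_set_ne _ _ _ _ _ (by omega), getD_set_self]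
        simp; omega
      · rw [hP0, getD_set_self]
        simp; omega
  | succ k hk ih =>
      obtain ⟨h1, h2, hF, h3, h4, h5⟩ := ih (by omega)
      have hstep : cutFold A (k + 1) = cutStepA A (cutFold A k) (k : Int) := by
        unfold cutFold
        rw [show (((k + 1 : Nat)) : Int) = (k : Int) + 1 by push_cast; ring,
            PySem.List.pyRange_one_succ_right (show (2:Int) ≤ (k:Int) by exact_mod_cast hk),
            List.foldl_append]
        rfl
      have hcast1 : ((k : Int) - 1) = ((k - 1 : Nat) : Int) := by omega
      have hcast2 : ((k : Int) - 2) = ((k - 2 : Nat) : Int) := by omega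
      have hread1 : PySem.List.pyGetD (cutFold A k).1 ((k : Int) - 1) 0 = Fv A (k - 1) := by
        rw [hcast1]; simp; exact hF (k - 1) (by omega)
      have hread2 : PySem.List.pyGetD (cutFold A k).1 ((k : Int) - 2) 0 = Fv A (k - 2) := by
        rw [hcast2]; simp; exact hF (k - 2) (by omega)
      have hreadA : PySem.List.pyGetD A (k : Int) 0 = A.getD k 0 := by simp
      have hsetF : ∀ v : Int, PySem.List.pySetD (cutFold A k).1 (k : Int) v =
          (cutFold A k).1.set k v := by
        intro v
        rw [PySem.List.pySetD_of_nonneg _ _ (by positivity)]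
        simp
      have hsetP : ∀ e : Option Int × Bool, PySem.List.pySetD (cutFold A k).2 (k : Int) e =
          (cutFold A k).2.set k e := by
        intro e
        rw [PySem.List.pySetD_of_nonneg _ _ (by positivity)]
        simp
      by_cases hc : Fv A (k - 1) ≥ Fv A (k - 2) + A.getD k 0
      all_goals (
        first
        | (rw [hstep]
           unfold cutStepA
           rw [hread1, hread2, hreadA, if_pos hc, hsetF, hsetP])
        | (rw [hstep]
           unfold cutStepA
           rw [hread1, hread2, hreadA, if_neg hc, hsetF, hsetP])
        refine ⟨by simp [h1], by simp [h2], ?_, ?_, ?_, ?_⟩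
        · intro j hj
          by_cases hjeq : j = k
          · subst hjeq
            rw [getD_set_self _ _ _ _ (by omega), Fv_eq A j hk]
            first
            | rw [if_pos hc]
            | rw [if_neg hc]
          · rw [getD_set_ne _ _ _ _ _ (by omega)]
            exact hF j (by omega)
        · rw [getD_set_ne _ _ _ _ _ (by omega)]; exact h3
        · rw [getD_set_ne _ _ _ _ _ (by omega)]; exact h4
        · intro j hj2 hjk
          by_cases hjeq : j = k
          · subst hjeq
            rw [getD_set_self _ _ _ _ (by omega)]
            first
            | rw [if_pos hc]
            | rw [if_neg hc]
          · have hjlt : j < k := by omega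
            rw [getD_set_ne _ _ _ _ _ (by omega)]
            exact h5 j hj2 hjlt )

theorem walkA_eq_sol (A : List Int) (P : List (Option Int × Bool))
    (hP0 : P.getD 0 cutDflt = ((none : Option Int), true))
    (hP1 : P.getD 1 cutDflt =
      (if PySem.List.pyGetD A 1 0 ≥ PySem.List.pyGetD A 0 0 then ((none : Option Int), true)
       else (some 0, false)))
    (hPj : ∀ j : Nat, 2 ≤ j → j < A.length →
      P.getD j cutDflt =
        (if Fv A (j - 1) ≥ Fv A (j - 2) + A.getD j 0
         then (some ((j : Int) - 1), false) else (some ((j : Int) - 2), true))) :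
    ∀ curr : Nat, curr < A.length → ∀ fuel acc, curr + 1 ≤ fuel →
      cutWalkA P fuel (curr : Int) acc = acc ++ (Sol A curr).reverse := by
  intro curr
  induction curr using Nat.strong_induction_on with
  | _ curr ih =>
    intro hcur fuel acc hfuel
    obtain ⟨f, rfl⟩ : ∃ f, fuel = f + 1 := ⟨fuel - 1, by omega⟩
    have hreadP : PySem.List.pyGetD P (curr : Int) ((none : Option Int), true) =
        P.getD curr cutDflt := by unfold cutDflt; simp
    by_cases h2 : 2 ≤ curr
    · have hPcurr := hPj curr h2 hcur
      have hcast1 : ((curr : Int) - 1) = ((curr - 1 : Nat) : Int) := by omega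
      have hcast2 : ((curr : Int) - 2) = ((curr - 2 : Nat) : Int) := by omega
      by_cases hc : Fv A (curr - 1) ≥ Fv A (curr - 2) + A.getD curr 0
      · rw [if_pos hc] at hPcurr
        show cutWalkA P (f + 1) (curr : Int) acc = acc ++ (Sol A curr).reverse
        simp only [cutWalkA, hreadP, hPcurr, Bool.false_eq_true, if_false]
        rw [hcast1, ih (curr - 1) (by omega) (by omega) f acc (by omega),
            Sol_eq A curr h2, if_pos hc]
      · rw [if_neg hc] at hPcurr
        show cutWalkA P (f + 1) (curr : Int) acc = acc ++ (Sol A curr).reverse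
        simp only [cutWalkA, hreadP, hPcurr, if_true]
        rw [hcast2, ih (curr - 2) (by omega) (by omega) f (acc ++ [(curr : Int)]) (by omega),
            Sol_eq A curr h2, if_neg hc]
        simp
    · interval_cases curr
      · show cutWalkA P (f + 1) ((0 : Nat) : Int) acc = acc ++ (Sol A 0).reverse
        simp only [cutWalkA, Nat.cast_zero]
        rw [show PySem.List.pyGetD P (0 : Int) ((none : Option Int), true) = P.getD 0 cutDflt by
              unfold cutDflt; exact PySem.List.pyGetD_zero P _,
            hP0]
        simp [Sol]
      · show cutWalkA P (f + 1) ((1 : Nat) : Int) acc = acc ++ (Sol A 1).reverse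
        simp only [cutWalkA, Nat.cast_one]
        rw [show PySem.List.pyGetD P (1 : Int) ((none : Option Int), true) = P.getD 1 cutDflt by
              unfold cutDflt; exact PySem.List.pyGetD_ofNat' P 1 _,
            hP1]
        have e0 : PySem.List.pyGetD A 0 0 = A.getD 0 0 := PySem.List.pyGetD_zero A _
        have e1 : PySem.List.pyGetD A 1 0 = A.getD 1 0 := PySem.List.pyGetD_ofNat' A 1 _
        by_cases hc0 : A.getD 1 0 ≥ A.getD 0 0
        · rw [if_pos (by rw [e0, e1]; exact hc0)]
          simp only [Sol]
          rw [if_pos hc0]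
          simp
        · rw [if_neg (by rw [e0, e1]; exact hc0)]
          obtain ⟨g, rfl⟩ : ∃ g, f = g + 1 := ⟨f - 1, by omega⟩
          simp only [cutWalkA]
          rw [show PySem.List.pyGetD P (0 : Int) ((none : Option Int), true) = P.getD 0 cutDflt by
                unfold cutDflt; exact PySem.List.pyGetD_zero P _,
              hP0]
          simp only [Sol]
          rw [if_neg hc0]
          simp

theorem bFold_eq (A : List Int) (_hn : 2 ≤ A.length) (k : Nat) (hk2 : 2 ≤ k) (hkn : k ≤ A.length) :
    (PySem.List.pyRange 2 (k : Int) 1).foldl (cutStepB A)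
      (if PySem.List.pyGetD A 1 0 ≥ PySem.List.pyGetD A 0 0 then
        (PySem.List.pyGetD A 0 0, [0], PySem.List.pyGetD A 1 0, ([1] : List Int))
       else
        (PySem.List.pyGetD A 0 0, [0], PySem.List.pyGetD A 0 0, ([0] : List Int)))
      = (Fv A (k - 2), Sol A (k - 2), Fv A (k - 1), Sol A (k - 1)) := by
  induction k, hk2 using Nat.le_induction with
  | base =>
      rw [show ((2 : Nat) : Int) = 2 by norm_num, PySem.List.pyRange_one_eq_nil (le_refl 2)]
      have e0 : PySem.List.pyGetD A 0 0 = A.getD 0 0 := PySem.List.pyGetD_zero A _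
      have e1 : PySem.List.pyGetD A 1 0 = A.getD 1 0 := PySem.List.pyGetD_ofNat' A 1 _
      simp only [List.foldl_nil, e0, e1]
      norm_num [Fv, Sol]
      split <;> rfl
  | succ k hk ih =>
      rw [show (((k + 1 : Nat)) : Int) = (k : Int) + 1 by push_cast; ring,
          PySem.List.pyRange_one_succ_right (show (2 : Int) ≤ (k : Int) by exact_mod_cast hk),
          List.foldl_append, ih (by omega), List.foldl_cons, List.foldl_nil]
      have hreadA : PySem.List.pyGetD A (k : Int) 0 = A.getD k 0 := by simp
      unfold cutStepB
      simp only [hreadA]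
      by_cases hc : Fv A (k - 1) ≥ Fv A (k - 2) + A.getD k 0
      · rw [if_pos hc, show k + 1 - 2 = k - 1 by omega, show k + 1 - 1 = k from rfl,
            Fv_eq A k hk, Sol_eq A k hk, if_pos hc, if_pos hc]
      · rw [if_neg hc, show k + 1 - 2 = k - 1 by omega, show k + 1 - 1 = k from rfl,
            Fv_eq A k hk, Sol_eq A k hk, if_neg hc, if_neg hc]

-- ===== VERDICT =====
theorem cut_forrest_spec : Claim_equal_cut_forrest := by
  intro A _ hpre
  unfold Spec_cut_forrest
  have hn : 2 ≤ A.length := hpre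
  have hA : cut_forrest A =
      (cutWalkA (cutFold A A.length).2 A.length ((A.length : Int) - 1) []).reverse := by
    by_cases hc : PySem.List.pyGetD A 1 0 ≥ PySem.List.pyGetD A 0 0
    · simp only [cut_forrest, cutFold, cutF0, cutP0, if_pos hc]
    · simp only [cut_forrest, cutFold, cutF0, cutP0, if_neg hc]
  obtain ⟨h1, h2, hF, h3, h4, h5⟩ := cutInv A hn A.length hn le_rfl
  have hcast : ((A.length : Int) - 1) = ((A.length - 1 : Nat) : Int) := by omega
  have hB : cut_forrest_alt A = Sol A (A.length - 1) := by
    unfold cut_forrest_alt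
    simp only [bFold_eq A hn A.length hn le_rfl]
  rw [hA, hcast, walkA_eq_sol A (cutFold A A.length).2 h3 h4 h5 (A.length - 1) (by omega)
        A.length [] (by omega), hB]
  simp
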